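-- pv_equiv track=rewrite | github.com/osheensth/aaa | test_1.py | get_text_position
-- ===== SOURCE A (Python) =====
-- def get_text_position(content, search_text, x_offset, y_offset):
--     lines = content.split('\n')
--     for line in lines:
--         if search_text in line:
--             x = line.find(search_text) * 5 + len(search_text) * 5 + x_offset  # Adjust the multipliers and offset for position
--             y = lines.index(line) * 12 + y_offset  # Adjust the multiplier and offset for vertical position
--             return x, y
--     return None, None
-- ===== SOURCE B (Python) =====
-- def get_text_position(content, search_text, x_offset, y_offset):
--     if '\n' in search_text:
--         # text containing a newline can never lie inside a single line
--         return None, None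
--     pos = content.find(search_text)
--     if pos == -1:
--         return None, None
--     parts = content[:pos].split('\n')
--     x = len(parts[-1]) * 5 + len(search_text) * 5 + x_offset
--     y = (len(parts) - 1) * 12 + y_offset
--     return x, y
-- ===== Notes on version B (the rewrite author's own statement) =====
-- stated objective: alternative
-- what changed: Instead of splitting the whole content into lines and scanning them with a per-line membership test, per-line find and list.index, B does one global content.find(search_text), splits only the prefix before the match to read off the line number and column, and guards the impossible multi-line search text up front.
import Mathlib
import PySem

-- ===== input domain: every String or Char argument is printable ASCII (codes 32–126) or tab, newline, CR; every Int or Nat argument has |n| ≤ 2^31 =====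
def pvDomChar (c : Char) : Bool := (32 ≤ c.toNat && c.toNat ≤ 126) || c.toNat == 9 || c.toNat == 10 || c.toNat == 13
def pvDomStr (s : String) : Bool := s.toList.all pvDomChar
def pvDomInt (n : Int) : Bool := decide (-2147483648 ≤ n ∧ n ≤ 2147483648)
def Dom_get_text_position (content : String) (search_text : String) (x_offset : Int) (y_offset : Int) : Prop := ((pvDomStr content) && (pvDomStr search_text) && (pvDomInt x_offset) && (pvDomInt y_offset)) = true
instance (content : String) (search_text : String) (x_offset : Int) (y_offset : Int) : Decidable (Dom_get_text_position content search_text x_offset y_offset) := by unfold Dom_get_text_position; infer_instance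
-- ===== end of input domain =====

-- B replaces A's split-into-lines-and-scan loop by one global find plus a split of
-- the prefix before the match (objective: alternative decomposition, similar cost).

-- ===== PORT A =====
-- the 'for line in lines' loop; 'lines' is carried alongside for 'lines.index(line)'
-- ('index?' can never be none there since line ∈ lines; '.getD 0' only totalises it)
def pvLoopA (st : List Char) (xo yo : Int) (lines : List (List Char)) :
    List (List Char) → Option Int × Option Int
  | [] => (none, none)
  | line :: rest =>
    if PySem.Chars.isIn st line then
      (some (PySem.Chars.find line st * 5 + (st.length : Int) * 5 + xo),
       some ((((PySem.List.index? lines line).getD 0 : Nat) : Int) * 12 + yo))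
    else pvLoopA st xo yo lines rest

def get_text_position (content : String) (search_text : String) (x_offset : Int) (y_offset : Int) : Option Int × Option Int :=
  let lines := PySem.Chars.splitOn content.toList ['\n']
  pvLoopA search_text.toList x_offset y_offset lines lines

-- ===== PORT B =====
-- ('pyGet? parts (-1)' can never be none since split never returns []; '.getD []' only totalises it)
def get_text_position_alt (content : String) (search_text : String) (x_offset : Int) (y_offset : Int) : Option Int × Option Int :=
  if PySem.Chars.isIn ['\n'] search_text.toList then (none, none)
  else
    let pos := PySem.Chars.find content.toList search_text.toList
    if pos = -1 then (none, none)
    else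
      let parts := PySem.Chars.splitOn (PySem.List.slice content.toList none (some pos)) ['\n']
      (some ((((PySem.List.pyGet? parts (-1)).getD []).length : Int) * 5 + (search_text.toList.length : Int) * 5 + x_offset),
       some (((parts.length : Int) - 1) * 12 + y_offset))

-- ===== PRECONDITION & SPEC =====
def Spec_get_text_position (content : String) (search_text : String) (x_offset : Int) (y_offset : Int) (out : Option Int × Option Int) : Prop := out = get_text_position_alt content search_text x_offset y_offset
instance (content : String) (search_text : String) (x_offset : Int) (y_offset : Int) (out : Option Int × Option Int) : Decidable (Spec_get_text_position content search_text x_offset y_offset out) := by unfold Spec_get_text_position; infer_instance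

-- ===== CLAIM (what is proved, stated in full; the proofs are below) =====
def Claim_equal_get_text_position : Prop := ∀ (content : String) (search_text : String) (x_offset : Int) (y_offset : Int), Dom_get_text_position content search_text x_offset y_offset → Spec_get_text_position content search_text x_offset y_offset (get_text_position content search_text x_offset y_offset)

-- ===== LEMMAS AND PROOFS =====

def pvSplit (c : Char) : List Char → List (List Char)
  | [] => [[]]
  | a :: rest => if a = c then [] :: pvSplit c rest else (pvSplit c rest).modifyHead (a :: ·)

theorem pvSplit_ne_nil (c : Char) (s : List Char) : pvSplit c s ≠ [] := by
  induction s with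
  | nil => simp [pvSplit]
  | cons a rest ih =>
    simp only [pvSplit]
    split_ifs
    · simp
    · intro h; exact ih (by simpa using congrArg List.length h)

theorem pvSplit_go (c : Char) : ∀ (fuel : Nat) (l : List Char) (cur : List Char)
    (acc : List (List Char)), l.length ≤ fuel →
    PySem.Chars.splitOn.go [c] fuel l cur acc =
      acc.reverse ++ (pvSplit c l).modifyHead (cur.reverse ++ ·) := by
  intro fuel
  induction fuel with
  | zero =>
    intro l cur acc h
    have : l = [] := by simpa using List.length_eq_zero_iff.mp (Nat.le_zero.mp h)
    subst this
    simp [PySem.Chars.splitOn.go, pvSplit]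
  | succ f ih =>
    intro l cur acc h
    cases l with
    | nil => simp [PySem.Chars.splitOn.go, pvSplit]
    | cons a rest =>
      simp only [PySem.Chars.splitOn.go]
      by_cases hac : a = c
      · subst hac
        have hpre : List.isPrefixOf [a] (a :: rest) = true := by simp [List.isPrefixOf]
        rw [if_pos hpre]
        simp only [List.length_cons, List.length_nil, Nat.zero_add, List.drop_succ_cons, List.drop_zero]
        rw [ih rest [] (cur.reverse :: acc) (by simpa using Nat.le_of_succ_le_succ h)]
        simp only [pvSplit]
        rcases pvSplit a rest with _ | ⟨p, ps⟩ <;> simp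
      · have hpre : List.isPrefixOf [c] (a :: rest) = false := by
          simp [List.isPrefixOf]; exact fun hh => (hac hh.symm).elim
        rw [if_neg (by simp [hpre])]
        rw [ih rest (a :: cur) acc (by simpa using Nat.le_of_succ_le_succ h)]
        simp only [pvSplit, if_neg hac]
        rcases hs : pvSplit c rest with _ | ⟨p, ps⟩
        · exact absurd hs (pvSplit_ne_nil c rest)
        · simp

theorem splitOn_eq_pvSplit (c : Char) (s : List Char) :
    PySem.Chars.splitOn s [c] = pvSplit c s := by
  show PySem.Chars.splitOn.go [c] (s.length + 1) s [] [] = _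
  rw [pvSplit_go c (s.length + 1) s [] [] (Nat.le_succ _)]
  rcases hs : pvSplit c s with _ | ⟨p, ps⟩
  · exact absurd hs (pvSplit_ne_nil c s)
  · simp

theorem pvSplit_no_sep {c : Char} {s : List Char} (h : c ∉ s) : pvSplit c s = [s] := by
  induction s with
  | nil => rfl
  | cons a rest ih =>
    simp only [List.mem_cons, not_or] at h
    simp [pvSplit, Ne.symm h.1, ih h.2]

theorem pvSplit_append {c : Char} {l : List Char} (r : List Char) (h : c ∉ l) :
    pvSplit c (l ++ c :: r) = l :: pvSplit c r := by
  induction l with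
  | nil => simp [pvSplit]
  | cons a rest ih =>
    simp only [List.mem_cons, not_or] at h
    simp [pvSplit, Ne.symm h.1, ih h.2]

theorem mem_pvSplit_not_mem {c : Char} {s part : List Char} (h : part ∈ pvSplit c s) : c ∉ part := by
  induction s generalizing part with
  | nil =>
    simp only [pvSplit, List.mem_singleton] at h
    subst h; simp
  | cons a rest ih =>
    simp only [pvSplit] at h
    by_cases hac : a = c
    · rw [if_pos hac] at h
      rcases List.mem_cons.mp h with h' | h'
      · subst h'; simp
      · exact ih h'
    · rw [if_neg hac] at h
      rcases hs : pvSplit c rest with _ | ⟨p, ps⟩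
      · exact absurd hs (pvSplit_ne_nil c rest)
      · rw [hs] at h
        simp only [List.modifyHead_cons, List.mem_cons] at h
        rcases h with h | h
        · subst h
          have : c ∉ p := ih (by rw [hs]; exact List.mem_cons_self)
          simp only [List.mem_cons, not_or]
          exact ⟨fun hh => hac hh.symm, this⟩
        · exact ih (by rw [hs]; exact List.mem_cons_of_mem _ h)

theorem find_eq_of {s st : List Char} {k : Nat} (h1 : st <+: s.drop k)
    (h2 : ∀ i < k, ¬ st <+: List.drop i s) : PySem.Chars.find s st = (k : Int) := by
  have hinf : st <:+: s := by
    obtain ⟨t, ht⟩ := h1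
    exact ⟨s.take k, t, by rw [List.append_assoc, ht, List.take_append_drop]⟩
  have hnn : 0 ≤ PySem.Chars.find s st := (PySem.Chars.find_nonneg_iff s st).mpr hinf
  obtain ⟨hpre, hmin⟩ := PySem.Chars.find_spec hnn
  have hkk : (PySem.Chars.find s st).toNat = k := by
    rcases Nat.lt_trichotomy (PySem.Chars.find s st).toNat k with h | h | h
    · exact absurd hpre (h2 _ h)
    · exact h
    · exact absurd h1 (hmin _ h)
  omega

theorem prefix_drop_left {st l r : List Char} {c : Char} (hc : c ∉ st) {j : Nat}
    (hj : j ≤ l.length) (h : st <+: (l ++ c :: r).drop j) :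
    st <+: l.drop j ∧ j + st.length ≤ l.length := by
  rw [List.drop_append_of_le_length hj] at h
  have hlen : st.length ≤ (l.drop j).length := by
    by_contra hlt
    push_neg at hlt
    obtain ⟨t, ht⟩ := h
    have h1 : (List.drop j l ++ c :: r)[(List.drop j l).length]? = some c := by
      rw [List.getElem?_append_right (le_refl _)]
      simp
    have h2 : (st ++ t)[(List.drop j l).length]? = st[(List.drop j l).length]? :=
      List.getElem?_append_left hlt
    exact hc (List.mem_of_getElem? (by rw [← h2, ht, h1]))
  constructor
  · have hst : st = (List.drop j l ++ c :: r).take st.length := List.prefix_iff_eq_take.mp h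
    rw [List.take_append_of_le_length hlen] at hst
    rw [hst]
    exact List.take_prefix _ _
  · have := List.length_drop (l := l) (i := j)
    omega

theorem find_append_of_isIn {st l r : List Char} {c : Char} (hc : c ∉ st) (hl : c ∉ l)
    (h : PySem.Chars.isIn st l = true) :
    PySem.Chars.find (l ++ c :: r) st = PySem.Chars.find l st := by
  have hnn : 0 ≤ PySem.Chars.find l st :=
    (PySem.Chars.find_nonneg_iff l st).mpr ((PySem.Chars.isIn_iff_infix st l).mp h)
  obtain ⟨hpre, hmin⟩ := PySem.Chars.find_spec hnn
  set k := (PySem.Chars.find l st).toNat with hk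
  have hkle : k ≤ l.length := by
    have := PySem.Chars.find_le_length l st
    omega
  have h1 : st <+: (l ++ c :: r).drop k := by
    rw [List.drop_append_of_le_length hkle]
    exact hpre.trans (List.prefix_append _ _)
  have h2 : ∀ i < k, ¬ st <+: List.drop i (l ++ c :: r) := by
    intro i hi hcon
    exact hmin i hi (prefix_drop_left hc (by omega) hcon).1
  rw [find_eq_of h1 h2]
  omega

theorem drop_append_high {l r : List Char} {c : Char} {i : Nat} (hi : l.length + 1 ≤ i) :
    List.drop i (l ++ c :: r) = List.drop (i - (l.length + 1)) r := by
  have h0 : l ++ c :: r = (l ++ [c]) ++ r := by simp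
  rw [h0, List.drop_append]
  have h1 : List.drop i (l ++ [c]) = [] := List.drop_eq_nil_of_le (by simp; omega)
  have h2 : i - (l ++ [c]).length = i - (l.length + 1) := by simp
  rw [h1, h2, List.nil_append]

theorem find_append_of_not_isIn {st l r : List Char} {c : Char} (hc : c ∉ st)
    (h : PySem.Chars.isIn st l = false) :
    PySem.Chars.find (l ++ c :: r) st =
      (if PySem.Chars.find r st = -1 then -1 else (l.length : Int) + 1 + PySem.Chars.find r st) := by
  have hnotl : ∀ j, ¬ st <+: List.drop j l := by
    intro j hcon
    obtain ⟨t, ht⟩ := hcon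
    have : st <:+: l := ⟨l.take j, t, by rw [List.append_assoc, ht, List.take_append_drop]⟩
    rw [(PySem.Chars.isIn_iff_infix st l).mpr this] at h
    exact absurd h (by simp)
  have hlow : ∀ i ≤ l.length, ¬ st <+: List.drop i (l ++ c :: r) := by
    intro i hi hcon
    exact hnotl i (prefix_drop_left hc hi hcon).1
  split_ifs with hr
  · rw [PySem.Chars.find_eq_neg_one_iff] at hr ⊢
    intro hcon
    obtain ⟨j, hj⟩ := (PySem.Chars.exists_prefix_drop_iff_isIn st (l ++ c :: r)).mpr
      ((PySem.Chars.isIn_iff_infix st _).mpr hcon)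
    by_cases hjl : j ≤ l.length
    · exact hlow j hjl hj
    · rw [drop_append_high (by omega)] at hj
      exact hr ⟨r.take (j - (l.length + 1)), (hj.choose), by
        rw [List.append_assoc, hj.choose_spec, List.take_append_drop]⟩
  · have hnn : 0 ≤ PySem.Chars.find r st := by
      have := PySem.Chars.neg_one_le_find r st
      omega
    obtain ⟨hpre, hmin⟩ := PySem.Chars.find_spec hnn
    set p := (PySem.Chars.find r st).toNat with hp
    have h1 : st <+: List.drop (l.length + 1 + p) (l ++ c :: r) := by
      rw [drop_append_high (by omega)]
      simpa using hpre
    have h2 : ∀ i < l.length + 1 + p, ¬ st <+: List.drop i (l ++ c :: r) := by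
      intro i hi hcon
      by_cases hil : i ≤ l.length
      · exact hlow i hil hcon
      · rw [drop_append_high (by omega)] at hcon
        exact hmin (i - (l.length + 1)) (by omega) hcon
    rw [find_eq_of h1 h2]
    push_cast
    omega

-- A's loop with the running line number made explicit
def pvSpecA (st : List Char) (xo yo : Int) : Nat → List (List Char) → Option Int × Option Int
  | _, [] => (none, none)
  | i, line :: rest =>
    if PySem.Chars.isIn st line then
      (some (PySem.Chars.find line st * 5 + (st.length : Int) * 5 + xo),
       some ((i : Int) * 12 + yo))
    else pvSpecA st xo yo (i + 1) rest

theorem idxOf?_append_self {α : Type} [BEq α] [LawfulBEq α] {v : α} {done rest : List α}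
    (h : v ∉ done) : List.idxOf? v (done ++ v :: rest) = some done.length := by
  induction done with
  | nil => simp [List.idxOf?_cons]
  | cons d ds ih =>
    simp only [List.mem_cons, not_or] at h
    simp [List.idxOf?_cons, beq_iff_eq, Ne.symm h.1, ih h.2]

theorem pvLoopA_eq_specA (st : List Char) (xo yo : Int) :
    ∀ (rem done : List (List Char)), (∀ d ∈ done, PySem.Chars.isIn st d = false) →
    pvLoopA st xo yo (done ++ rem) rem = pvSpecA st xo yo done.length rem := by
  intro rem
  induction rem with
  | nil => intro done _; rfl
  | cons line rest ih =>
    intro done hdone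
    simp only [pvLoopA, pvSpecA]
    by_cases hmatch : PySem.Chars.isIn st line = true
    · rw [if_pos hmatch, if_pos hmatch]
      have hnot : line ∉ done := fun hm => by rw [hdone line hm] at hmatch; exact absurd hmatch (by simp)
      rw [show PySem.List.index? (done ++ line :: rest) line = List.idxOf? line (done ++ line :: rest) from rfl]
      rw [idxOf?_append_self hnot]
      rfl
    · rw [if_neg hmatch, if_neg hmatch]
      have := ih (done ++ [line]) (by
        intro d hd
        rcases List.mem_append.mp hd with h' | h'
        · exact hdone d h'
        · simp at h'; subst h'; simpa using hmatch)
      simpa using this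

theorem exists_decomp {s : List Char} {c : Char} (h : c ∈ s) :
    ∃ l r, s = l ++ c :: r ∧ c ∉ l := by
  induction s with
  | nil => cases h
  | cons a rest ih =>
    by_cases hac : a = c
    · exact ⟨[], rest, by rw [hac]; simp, by simp⟩
    · rcases List.mem_cons.mp h with h' | h'
      · exact absurd h'.symm hac
      · obtain ⟨l, r, hs, hl⟩ := ih h'
        exact ⟨a :: l, r, by rw [hs]; simp, by simp [hl]; exact fun hh => hac hh.symm⟩

theorem pvKey (st : List Char) (hc : ('\n' : Char) ∉ st) (xo yo : Int) :
    ∀ (n : Nat) (s : List Char), s.length ≤ n → ∀ (i : Nat),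
    pvSpecA st xo yo i (pvSplit '\n' s) =
      (if PySem.Chars.find s st = -1 then (none, none)
       else
         (some (((((pvSplit '\n' (s.take (PySem.Chars.find s st).toNat)).getLast?.getD []).length : Int)) * 5 + (st.length : Int) * 5 + xo),
          some (((i : Int) + ((pvSplit '\n' (s.take (PySem.Chars.find s st).toNat)).length : Int) - 1) * 12 + yo))) := by
  intro n
  induction n with
  | zero =>
    intro s hs i
    have : s = [] := by simpa using List.length_eq_zero_iff.mp (Nat.le_zero.mp hs)
    subst this
    by_cases h0 : PySem.Chars.isIn st [] = true
    · have hf : PySem.Chars.find ([] : List Char) st = 0 := by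
        have := (PySem.Chars.find_nonneg_iff [] st).mpr ((PySem.Chars.isIn_iff_infix st []).mp h0)
        have := PySem.Chars.find_le_length ([] : List Char) st
        simp at this; omega
      simp [pvSplit, pvSpecA, h0, hf]
    · have hf : PySem.Chars.find ([] : List Char) st = -1 := by
        rw [PySem.Chars.find_eq_neg_one_iff]
        intro hcon
        rw [(PySem.Chars.isIn_iff_infix st []).mpr hcon] at h0; exact h0 rfl
      have h0f : PySem.Chars.isIn st [] = false := by simpa using h0
      simp [pvSplit, pvSpecA, h0f, hf]
  | succ m ih =>
    intro s hs i
    by_cases hmem : ('\n' : Char) ∈ s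
    case neg =>
      -- single line
      rw [pvSplit_no_sep hmem]
      by_cases h0 : PySem.Chars.isIn st s = true
      · have hnn : 0 ≤ PySem.Chars.find s st :=
          (PySem.Chars.find_nonneg_iff s st).mpr ((PySem.Chars.isIn_iff_infix st s).mp h0)
        have hne : PySem.Chars.find s st ≠ -1 := by omega
        have hkle : (PySem.Chars.find s st).toNat ≤ s.length := by
          have := PySem.Chars.find_le_length s st; omega
        have htake : ('\n' : Char) ∉ s.take (PySem.Chars.find s st).toNat :=
          fun hm => hmem (List.mem_of_mem_take hm)
        rw [if_neg hne]
        simp only [pvSpecA, if_pos h0, pvSplit_no_sep htake]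
        simp [List.length_take, Nat.min_eq_left hkle, Int.toNat_of_nonneg hnn]
      · have hf : PySem.Chars.find s st = -1 := by
          rw [PySem.Chars.find_eq_neg_one_iff]
          intro hcon
          rw [(PySem.Chars.isIn_iff_infix st s).mpr hcon] at h0; exact h0 rfl
        have h0f : PySem.Chars.isIn st s = false := by simpa using h0
        simp [pvSpecA, h0f, hf]
    case pos =>
      obtain ⟨l, r, rfl, hl⟩ := exists_decomp hmem
      rw [pvSplit_append r hl]
      by_cases h0 : PySem.Chars.isIn st l = true
      · -- match in the first line
        have hnn : 0 ≤ PySem.Chars.find l st :=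
          (PySem.Chars.find_nonneg_iff l st).mpr ((PySem.Chars.isIn_iff_infix st l).mp h0)
        have hfs := find_append_of_isIn (r := r) hc hl h0
        have hne : PySem.Chars.find (l ++ '\n' :: r) st ≠ -1 := by omega
        have hkle : (PySem.Chars.find l st).toNat ≤ l.length := by
          have := PySem.Chars.find_le_length l st; omega
        have htake : List.take (PySem.Chars.find (l ++ '\n' :: r) st).toNat (l ++ '\n' :: r) =
            List.take (PySem.Chars.find l st).toNat l := by
          rw [hfs, List.take_append_of_le_length hkle]
        have hnotake : ('\n' : Char) ∉ List.take (PySem.Chars.find l st).toNat l :=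
          fun hm => hl (List.mem_of_mem_take hm)
        rw [if_neg hne]
        simp only [pvSpecA, if_pos h0, htake, pvSplit_no_sep hnotake]
        simp [List.length_take, Nat.min_eq_left hkle, Int.toNat_of_nonneg hnn]
      · -- skip the first line, recurse on r
        have h0' : PySem.Chars.isIn st l = false := by simpa using h0
        have hfs := find_append_of_not_isIn (r := r) hc h0'
        simp only [pvSpecA, if_neg h0]
        rw [ih r (by simp at hs; omega) (i + 1)]
        by_cases hr : PySem.Chars.find r st = -1
        · rw [if_pos hr, hfs, if_pos hr, if_pos rfl]
        · have hnn : 0 ≤ PySem.Chars.find r st := by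
            have := PySem.Chars.neg_one_le_find r st; omega
          rw [if_neg hr, hfs, if_neg hr]
          have hne2 : (l.length : Int) + 1 + PySem.Chars.find r st ≠ -1 := by omega
          rw [if_neg hne2]
          have hptake : List.take ((l.length : Int) + 1 + PySem.Chars.find r st).toNat (l ++ '\n' :: r)
              = l ++ '\n' :: List.take (PySem.Chars.find r st).toNat r := by
            have harith : ((l.length : Int) + 1 + PySem.Chars.find r st).toNat
                = (l ++ ['\n']).length + (PySem.Chars.find r st).toNat := by
              simp; omega
            rw [show l ++ '\n' :: r = (l ++ ['\n']) ++ r by simp, harith, List.take_append]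
            rw [List.take_of_length_le (by simp)]
            simp
          rw [hptake, pvSplit_append _ hl]
          rcases hq : pvSplit '\n' (List.take (PySem.Chars.find r st).toNat r) with _ | ⟨q, qs⟩
          · exact absurd hq (pvSplit_ne_nil _ _)
          · simp only [List.getLast?_cons_cons, List.length_cons]
            apply Prod.ext
            · rfl
            · show some _ = (some _ : Option Int)
              congr 1
              push_cast
              ring

theorem pvSpecA_all_fail (st : List Char) (xo yo : Int) :
    ∀ (i : Nat) (lines : List (List Char)), (∀ d ∈ lines, PySem.Chars.isIn st d = false) →
    pvSpecA st xo yo i lines = (none, none) := by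
  intro i lines
  induction lines generalizing i with
  | nil => intro _; rfl
  | cons line rest ih =>
    intro h
    simp only [pvSpecA, h line List.mem_cons_self]
    simp only [Bool.false_eq_true, if_false]
    exact ih (i + 1) (fun d hd => h d (List.mem_cons_of_mem _ hd))

theorem slice_to_take {xs : List Char} {p : Int} (h0 : 0 ≤ p) (hl : p ≤ (xs.length : Int)) :
    PySem.List.slice xs none (some p) = xs.take p.toNat := by
  simp only [PySem.List.slice, PySem.List.clampIdx]
  congr 1
  split_ifs <;> omega

theorem pyGet?_neg_one {α : Type} {xs : List α} (h : xs ≠ []) :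
    PySem.List.pyGet? xs (-1) = xs.getLast? := by
  have hn : 1 ≤ xs.length := List.length_pos_iff.mpr h
  simp only [PySem.List.pyGet?, PySem.List.pyIdx?, List.getLast?_eq_getElem?]
  norm_num
  rw [if_pos hn]
  simp

theorem ports_agree (content search_text : String) (xo yo : Int) :
    get_text_position content search_text xo yo = get_text_position_alt content search_text xo yo := by
  unfold get_text_position get_text_position_alt
  simp only [splitOn_eq_pvSplit]
  set cs := content.toList
  set st := search_text.toList
  have hloop : pvLoopA st xo yo (pvSplit '\n' cs) (pvSplit '\n' cs)
      = pvSpecA st xo yo 0 (pvSplit '\n' cs) := by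
    have := pvLoopA_eq_specA st xo yo (pvSplit '\n' cs) [] (by simp)
    simpa using this
  rw [hloop]
  by_cases hg : ('\n' : Char) ∈ st
  · rw [if_pos ((PySem.Chars.isIn_iff_infix _ _).mpr ((List.singleton_infix_iff _ _).mpr hg))]
    apply pvSpecA_all_fail
    intro d hd
    by_contra hcon
    have : PySem.Chars.isIn st d = true := by
      cases h' : PySem.Chars.isIn st d
      · exact absurd h' hcon
      · rfl
    exact mem_pvSplit_not_mem hd (((PySem.Chars.isIn_iff_infix st d).mp this).subset hg)
  · rw [if_neg (fun hcon => hg ((List.singleton_infix_iff _ _).mp ((PySem.Chars.isIn_iff_infix _ _).mp hcon)))]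
    rw [pvKey st hg xo yo cs.length cs (le_refl _) 0]
    by_cases hf : PySem.Chars.find cs st = -1
    · rw [if_pos hf, if_pos hf]
    · have hnn : 0 ≤ PySem.Chars.find cs st := by
        have := PySem.Chars.neg_one_le_find cs st; omega
      have hle := PySem.Chars.find_le_length cs st
      rw [if_neg hf, if_neg hf]
      rw [slice_to_take hnn hle]
      rw [pyGet?_neg_one (pvSplit_ne_nil _ _)]
      simp

-- ===== VERDICT (by name: the statement is the Claim_ definition above) =====
theorem get_text_position_spec : Claim_equal_get_text_position := by
  intro content search_text x_offset y_offset _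
  unfold Spec_get_text_position
  exact ports_agree content search_text x_offset y_offset
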